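-- pv_equiv track=rewrite | github.com/camachoitzel/TIP_101 | Week 2/Unit_test.py | frequency_greater_than_n
-- ===== SOURCE A (Python) =====
-- def frequency_greater_than_n(nums, n):
--     nums.sort()
--     count = 1
--     result= {}
--
--     for i in range(1, len(nums)):
--         if nums[i] == nums[i - 1]:
--             count += 1
--
--         else:
--             if count > n:
--                 result[nums[i - 1]] = count
--             count = 1
--
--     if len(nums) > 0 and count > n:
--         result[nums[-1]] = count
--
--     return result
-- ===== SOURCE B (Python) =====
-- def frequency_greater_than_n(nums, n):
--     nums.sort()
--     freq = {}
--     for x in nums: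
--         freq[x] = freq.get(x, 0) + 1
--     return {v: c for v, c in freq.items() if c > n}
-- ===== Notes on version B (the rewrite author's own statement) =====
-- stated objective: simpler
-- what changed: replaces the index-based run-length scan over adjacent sorted elements (with the separate end-of-list flush) by a frequency dict built in one pass plus a filtering dict comprehension; nums is still sorted in place so the mutation side effect is identical
import Mathlib
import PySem

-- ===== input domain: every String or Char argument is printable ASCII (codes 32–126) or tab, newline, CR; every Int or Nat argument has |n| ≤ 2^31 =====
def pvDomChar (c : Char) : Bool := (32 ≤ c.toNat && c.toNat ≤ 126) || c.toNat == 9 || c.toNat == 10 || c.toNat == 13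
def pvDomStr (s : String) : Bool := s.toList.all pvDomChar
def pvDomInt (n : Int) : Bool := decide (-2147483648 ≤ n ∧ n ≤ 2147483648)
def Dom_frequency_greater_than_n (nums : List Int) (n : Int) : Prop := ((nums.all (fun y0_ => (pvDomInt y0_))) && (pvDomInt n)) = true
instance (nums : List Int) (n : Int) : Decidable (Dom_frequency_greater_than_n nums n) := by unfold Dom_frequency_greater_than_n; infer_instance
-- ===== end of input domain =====

-- B replaces A's adjacent-run scan with end-of-list flush by a frequency dict built in one pass
-- plus a filtering comprehension (objective: simpler). Both implementations sort nums in place,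
-- so the mutation side effect is identical; the equivalence proved here is about the return value.

-- ===== PORT A =====
def frequency_greater_than_n (nums : List Int) (n : Int) : List (Int × Int) :=
  let s := PySem.List.sorted nums (fun x => x) false
  let st := (PySem.List.pyRange 1 (PySem.List.len s) 1).foldl
    (fun (st : Int × PySem.Dict Int Int) i =>
      if PySem.List.pyGetD s i 0 = PySem.List.pyGetD s (i - 1) 0 then
        (st.1 + 1, st.2)
      else
        (1, if n < st.1 then st.2.insert (PySem.List.pyGetD s (i - 1) 0) st.1 else st.2))
    (1, PySem.Dict.empty)
  let result := if 0 < PySem.List.len s ∧ n < st.1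
    then st.2.insert (PySem.List.pyGetD s (-1) 0) st.1 else st.2
  result.items

-- ===== PORT B =====
def frequency_greater_than_n_alt (nums : List Int) (n : Int) : List (Int × Int) :=
  let s := PySem.List.sorted nums (fun x => x) false
  let freq := s.foldl (fun (d : PySem.Dict Int Int) x => d.insert x (d.getD x 0 + 1)) PySem.Dict.empty
  (freq.items.foldl (fun (r : PySem.Dict Int Int) p => if n < p.2 then r.insert p.1 p.2 else r)
    PySem.Dict.empty).items

-- ===== PRECONDITION & SPEC =====
def Spec_frequency_greater_than_n (nums : List Int) (n : Int) (out : List (Int × Int)) : Prop := out = frequency_greater_than_n_alt nums n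
instance (nums : List Int) (n : Int) (out : List (Int × Int)) : Decidable (Spec_frequency_greater_than_n nums n out) := by unfold Spec_frequency_greater_than_n; infer_instance

-- ===== CLAIM (what is proved, stated in full; the proofs are below) =====
def Claim_equal_frequency_greater_than_n : Prop := ∀ (nums : List Int) (n : Int), Dom_frequency_greater_than_n nums n → Spec_frequency_greater_than_n nums n (frequency_greater_than_n nums n)

-- ===== LEMMAS AND PROOFS =====

-- Structural version of A's run-length loop (prev = previous element, count = length of current run).

def runA (n : Int) : Int → Int → PySem.Dict Int Int → List Int → PySem.Dict Int Int
  | prev, count, r, [] => if n < count then r.insert prev count else r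
  | prev, count, r, x :: t =>
      if x = prev then runA n prev (count + 1) r t
      else runA n x 1 (if n < count then r.insert prev count else r) t

theorem runA_spec (n : Int) : ∀ (t : List Int) (prev count : Int) (r : PySem.Dict Int Int),
    List.Pairwise (· ≤ ·) (prev :: t) →
    (∀ k ∈ prev :: t, r.contains k = false) →
    (runA n prev count r t).items =
      r.items ++ ((PySem.Set.ofList (prev :: t)).filter
          (fun k => decide (n < (if k = prev then count else 0) + (t.count k : Int)))).map
        (fun k => (k, (if k = prev then count else 0) + (t.count k : Int))) := by
  intro t
  induction t with
  | nil =>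
    intro prev count r _ hr
    have hc : r.contains prev = false := hr prev (by simp)
    have hset : PySem.Set.ofList [prev] = [prev] := by
      simp [PySem.Set.ofList, PySem.Set.add, PySem.Set.empty, PySem.Set.contains]
    rw [runA, hset]
    by_cases h : n < count
    · rw [if_pos h, PySem.Dict.items_insert_of_not_contains r count hc]
      simp [h]
    · rw [if_neg h]
      simp [h]
  | cons x t' ih =>
    intro prev count r hpw hr
    by_cases hx : x = prev
    · subst hx
      rw [runA, if_pos rfl]
      have hset : PySem.Set.ofList (x :: x :: t') = PySem.Set.ofList (x :: t') := by
        simp [PySem.Set.ofList_cons, PySem.Set.discard, List.filter_filter]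
      have hpred : (fun k => decide (n < (if k = x then count else 0) + (((x :: t').count k : Nat) : Int)))
          = (fun k => decide (n < (if k = x then count + 1 else 0) + ((t'.count k : Nat) : Int))) := by
        funext k
        by_cases h : k = x
        · subst h
          simp
          constructor <;> intro <;> omega
        · have h2 : x ≠ k := fun hh => h hh.symm
          simp [h, h2]
      have hmap : (fun k => ((k : Int), (if k = x then count else 0) + (((x :: t').count k : Nat) : Int)))
          = (fun k => (k, (if k = x then count + 1 else 0) + ((t'.count k : Nat) : Int))) := by
        funext k
        by_cases h : k = x
        · subst h
          simp [Prod.ext_iff]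
          omega
        · have h2 : x ≠ k := fun hh => h hh.symm
          simp [h, h2]
      rw [hset, hpred, hmap]
      exact ih x (count + 1) r hpw.tail (fun k hk => hr k (List.mem_cons_of_mem x hk))
    · rw [runA, if_neg hx]
      have hprevnot : prev ∉ x :: t' := by
        intro hmem
        have hle1 : ∀ a ∈ x :: t', prev ≤ a := (List.pairwise_cons.mp hpw).1
        have hpw2 := (List.pairwise_cons.mp hpw).2
        rcases List.mem_cons.mp hmem with h | h
        · exact hx h.symm
        · have h1 : x ≤ prev := (List.pairwise_cons.mp hpw2).1 prev h
          exact hx (le_antisymm h1 (hle1 x List.mem_cons_self))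
      have hr' : ∀ k ∈ x :: t',
          (if n < count then r.insert prev count else r).contains k = false := by
        intro k hk
        have hkp : k ≠ prev := fun h => hprevnot (h ▸ hk)
        have := hr k (List.mem_cons_of_mem _ hk)
        split
        · rw [PySem.Dict.contains_insert]
          simp [hkp, this]
        · exact this
      rw [ih x 1 _ hpw.tail hr']
      -- normalise the inner predicate/map to (x :: t').count
      have hpred1 : (fun k => decide (n < (if k = x then 1 else 0) + ((t'.count k : Nat) : Int)))
          = (fun k => decide (n < (((x :: t').count k : Nat) : Int))) := by
        funext k
        by_cases h : k = x
        · subst h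
          simp
          constructor <;> intro <;> omega
        · have h2 : x ≠ k := fun hh => h hh.symm
          simp [h, h2]
      have hmap1 : (fun k => ((k : Int), (if k = x then 1 else 0) + ((t'.count k : Nat) : Int)))
          = (fun k => (k, (((x :: t').count k : Nat) : Int))) := by
        funext k
        by_cases h : k = x
        · subst h
          simp [Prod.ext_iff]
          omega
        · have h2 : x ≠ k := fun hh => h hh.symm
          simp [h, h2]
      rw [hpred1, hmap1]
      -- r'.items
      have hcp : r.contains prev = false := hr prev (by simp)
      have hritems : (if n < count then r.insert prev count else r).items
          = r.items ++ (if n < count then [(prev, count)] else []) := by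
        split
        · rw [PySem.Dict.items_insert_of_not_contains r count hcp]
        · simp
      rw [hritems]
      -- target side
      have hset2 : PySem.Set.ofList (prev :: x :: t') = prev :: PySem.Set.ofList (x :: t') := by
        rw [PySem.Set.ofList_cons]
        congr 1
        rw [PySem.Set.discard]
        apply List.filter_eq_self.mpr
        intro y hy
        have hy2 : y ∈ x :: t' := by simpa [PySem.Set.mem_ofList] using hy
        have : y ≠ prev := fun h => hprevnot (h ▸ hy2)
        simp [this]
      rw [hset2, List.filter_cons]
      have hcount0 : (x :: t').count prev = 0 := List.count_eq_zero_of_not_mem hprevnot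
      have hpprev : (decide (n < (if prev = prev then count else 0) + (((x :: t').count prev : Nat) : Int)))
          = decide (n < count) := by simp [hcount0]
      rw [hpprev]
      have hfc : List.filter (fun k => decide (n < (if k = prev then count else 0) + (((x :: t').count k : Nat) : Int)))
            (PySem.Set.ofList (x :: t'))
          = List.filter (fun k => decide (n < (((x :: t').count k : Nat) : Int))) (PySem.Set.ofList (x :: t')) := by
        apply List.filter_congr
        intro y hy
        have hy2 : y ∈ x :: t' := by simpa [PySem.Set.mem_ofList] using hy
        have hyne : y ≠ prev := fun h => hprevnot (h ▸ hy2)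
        simp [hyne]
      rw [hfc]
      have hmc : List.map (fun k => ((k : Int), (if k = prev then count else 0) + (((x :: t').count k : Nat) : Int)))
            (List.filter (fun k => decide (n < (((x :: t').count k : Nat) : Int))) (PySem.Set.ofList (x :: t')))
          = List.map (fun k => (k, (((x :: t').count k : Nat) : Int)))
            (List.filter (fun k => decide (n < (((x :: t').count k : Nat) : Int))) (PySem.Set.ofList (x :: t'))) := by
        apply List.map_congr_left
        intro y hy
        have hy2 : y ∈ x :: t' := by
          simpa [PySem.Set.mem_ofList] using List.mem_of_mem_filter hy
        have hyne : y ≠ prev := fun h => hprevnot (h ▸ hy2)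
        simp [hyne]
      by_cases hnc : n < count
      · rw [if_pos hnc, if_pos (by simpa using hnc), List.map_cons, hmc]
        simp [hcount0]
      · rw [if_neg hnc, if_neg (by simpa using hnc), hmc]
        simp

theorem fold_eq_runA (n : Int) (s : List Int) : ∀ (fuel : Nat) (a : Nat) (count : Int)
    (r : PySem.Dict Int Int), fuel = s.length - a → 1 ≤ a → a ≤ s.length →
    (let st := (PySem.List.pyRange (a : Int) (PySem.List.len s) 1).foldl
      (fun (st : Int × PySem.Dict Int Int) i =>
        if PySem.List.pyGetD s i 0 = PySem.List.pyGetD s (i - 1) 0 then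
          (st.1 + 1, st.2)
        else
          (1, if n < st.1 then st.2.insert (PySem.List.pyGetD s (i - 1) 0) st.1 else st.2))
      (count, r);
    if n < st.1 then st.2.insert (PySem.List.pyGetD s (-1) 0) st.1 else st.2) =
      runA n (PySem.List.pyGetD s ((a : Int) - 1) 0) count r (s.drop a) := by
  intro fuel
  induction fuel with
  | zero =>
    intro a count r hfuel h1 h2
    have ha : a = s.length := by omega
    subst ha
    have hnil : PySem.List.pyRange (s.length : Int) (PySem.List.len s) 1 = [] := by
      rw [PySem.List.pyRange_one_eq_nil]; simp [PySem.List.len]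
    rw [hnil]
    have hne : s ≠ [] := by intro h; subst h; simp at h1
    have hlast : PySem.List.pyGetD s ((s.length : Int) - 1) 0 = PySem.List.pyGetD s (-1) 0 := by
      rw [PySem.List.pyGetD_neg_one s 0 hne]
      rw [show ((s.length : Int) - 1) = (((s.length - 1 : Nat)) : Int) by omega]
      rw [PySem.List.pyGetD_natCast]
      rw [List.getLast_eq_getElem]
      rw [List.getD_eq_getElem s 0 (by omega)]
    simp only [List.foldl_nil, List.drop_length, runA, hlast]
  | succ m ih =>
    intro a count r hfuel h1 h2
    have hlt : a < s.length := by omega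
    have hcons : PySem.List.pyRange (a : Int) (PySem.List.len s) 1 =
        (a : Int) :: PySem.List.pyRange ((a : Int) + 1) (PySem.List.len s) 1 := by
      rw [PySem.List.pyRange_one_cons]; simp [PySem.List.len]; omega
    rw [hcons]
    have hga : PySem.List.pyGetD s ((a : Int)) 0 = s[a] := by
      rw [PySem.List.pyGetD_natCast, List.getD_eq_getElem s 0 hlt]
    have hdrop : s.drop a = s[a] :: s.drop (a + 1) := List.drop_eq_getElem_cons hlt
    have hcast : ((a : Int) + 1) = ((a + 1 : Nat) : Int) := by push_cast; ring
    simp only [List.foldl_cons, hga, hdrop]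
    by_cases hc : s[a] = PySem.List.pyGetD s ((a : Int) - 1) 0
    · rw [if_pos hc]
      conv_rhs => rw [runA, if_pos hc]
      rw [hcast, ih (a + 1) (count + 1) r (by omega) (by omega) (by omega)]
      congr 1
      rw [show ((a + 1 : Nat) : Int) - 1 = ((a : Nat) : Int) by push_cast; ring, hga, hc]
    · rw [if_neg hc]
      conv_rhs => rw [runA, if_neg hc]
      rw [hcast, ih (a + 1) 1 _ (by omega) (by omega) (by omega)]
      congr 1
      rw [show ((a + 1 : Nat) : Int) - 1 = ((a : Nat) : Int) by push_cast; ring, hga]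

-- B returns exactly the filtered counter items, keyed in first-occurrence order of the sorted list.
theorem alt_items (nums : List Int) (n : Int) :
    frequency_greater_than_n_alt nums n =
      ((PySem.Set.ofList (PySem.List.sorted nums (fun x => x) false)).filter
          (fun k => decide (n < ((PySem.List.sorted nums (fun x => x) false).count k : Int)))).map
        (fun k => (k, ((PySem.List.sorted nums (fun x => x) false).count k : Int))) := by
  show (((PySem.List.sorted nums (fun x => x) false).foldl
      (fun (d : PySem.Dict Int Int) x => d.insert x (d.getD x 0 + 1)) PySem.Dict.empty).items.foldl
      (fun (r : PySem.Dict Int Int) p => if n < p.2 then r.insert p.1 p.2 else r) PySem.Dict.empty).items = _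
  set s := PySem.List.sorted nums (fun x => x) false with hs
  rw [PySem.Dict.foldl_insert_getD_add_one_eq_counter, PySem.Dict.items_counter]
  rw [PySem.List.foldl_ite_eq_foldl_filter (fun (p : Int × Int) => n < p.2)
    (fun (r : PySem.Dict Int Int) p => r.insert p.1 p.2)]
  rw [List.filter_map, List.foldl_map]
  have hnd : ((PySem.Set.ofList s).filter
      ((fun (x : Int × Int) => decide (n < x.2)) ∘ fun k => (k, (s.count k : Int)))).Nodup :=
    (PySem.Set.nodup_ofList s).filter _
  rw [show (fun (d : PySem.Dict Int Int) (a : Int) =>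
        d.insert ((a, (s.count a : Int)).1) ((a, (s.count a : Int)).2)) =
      (fun d a => d.insert a ((s.count a : Int))) from rfl]
  rw [PySem.Dict.items_foldl_insert_fresh _ (fun a => a) (fun a => (s.count a : Int))
    PySem.Dict.empty (fun a _ => PySem.Dict.contains_empty a) (by simpa using hnd)]
  rfl

-- ===== VERDICT (by name: the statement is the Claim_ definition above) =====
theorem frequency_greater_than_n_spec : Claim_equal_frequency_greater_than_n := by
  unfold Claim_equal_frequency_greater_than_n Spec_frequency_greater_than_n
  intro nums n _
  rw [alt_items]
  show (let s := PySem.List.sorted nums (fun x => x) false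
    let st := (PySem.List.pyRange 1 (PySem.List.len s) 1).foldl
      (fun (st : Int × PySem.Dict Int Int) i =>
        if PySem.List.pyGetD s i 0 = PySem.List.pyGetD s (i - 1) 0 then
          (st.1 + 1, st.2)
        else
          (1, if n < st.1 then st.2.insert (PySem.List.pyGetD s (i - 1) 0) st.1 else st.2))
      (1, PySem.Dict.empty)
    let result := if 0 < PySem.List.len s ∧ n < st.1
      then st.2.insert (PySem.List.pyGetD s (-1) 0) st.1 else st.2
    result.items) = _
  have hpw : List.Pairwise (· ≤ ·) (PySem.List.sorted nums (fun x => x) false) :=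
    PySem.List.sorted_pairwise nums (fun x => x)
  set s := PySem.List.sorted nums (fun x => x) false with hsdef
  clear_value s
  cases s with
  | nil =>
    simp [PySem.List.len, PySem.List.pyRange_one_eq_nil]
    rfl
  | cons h t =>
    have hlen : 0 < PySem.List.len (h :: t) := by simp [PySem.List.len]
    have hone : ∀ (P : Prop), (0 < PySem.List.len (h :: t) ∧ P) ↔ P :=
      fun P => ⟨And.right, fun p => ⟨hlen, p⟩⟩
    simp only [hone]
    have hfold := fold_eq_runA n (h :: t) ((h :: t).length - 1) 1 1 PySem.Dict.empty
      (by simp) (by omega) (by simp)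
    simp only [Nat.cast_one] at hfold
    rw [hfold]
    have hget0 : PySem.List.pyGetD (h :: t) ((1 : Int) - 1) 0 = h := by
      norm_num [PySem.List.pyGetD_zero_cons]
    rw [hget0, List.drop_one, List.tail_cons]
    rw [runA_spec n t h 1 PySem.Dict.empty hpw (fun k _ => PySem.Dict.contains_empty k)]
    have hpred : (fun k => decide (n < (if k = h then (1 : Int) else 0) + ((t.count k : Nat) : Int)))
        = (fun k => decide (n < (((h :: t).count k : Nat) : Int))) := by
      funext k
      by_cases hk : k = h
      · subst hk
        simp
        constructor <;> intro <;> omega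
      · have h2 : h ≠ k := fun hh => hk hh.symm
        simp [h2, hk]
    have hmap : (fun k => ((k : Int), (if k = h then (1 : Int) else 0) + ((t.count k : Nat) : Int)))
        = (fun k => (k, (((h :: t).count k : Nat) : Int))) := by
      funext k
      by_cases hk : k = h
      · subst hk
        simp [Prod.ext_iff]
        omega
      · have h2 : h ≠ k := fun hh => hk hh.symm
        simp [h2, hk]
    rw [hpred, hmap]
    rfl
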